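-- pv_equiv track=rewrite | github.com/columnspace/courses | MIT6.006 Intro to Algorithms/assignments/ps3-template/count_anagram_substrings.py | build_freq_dict
-- ===== SOURCE A (Python) =====
-- def build_freq_dict(T, k):
--     d = {}
--     freq = [0] * 26
--     for i in range(k):
--         freq[ord(T[i])-ord('a')] += 1
--     d[tuple(freq)] = 1
--     for i in range(k, len(T)):
--         freq[ord(T[i - k])-ord('a')] -= 1
--         freq[ord(T[i])-ord('a')] += 1
--         d[tuple(freq)] = d.get(tuple(freq), 0) + 1
--     return d
-- ===== SOURCE B (Python) =====
-- def build_freq_dict(T, k):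
--     first = [0] * 26
--     for i in range(k):
--         first[ord(T[i]) - ord('a')] += 1
--     d = {tuple(first): 1}
--     for s in range(1, len(T) - k + 1):
--         cnt = [0] * 26
--         for c in T[s:s+k]:
--             cnt[ord(c) - ord('a')] += 1
--         key = tuple(cnt)
--         d[key] = d.get(key, 0) + 1
--     return d
-- ===== Notes on version B (the rewrite author's own statement) =====
-- stated objective: alternative
-- what changed: A maintains one sliding count vector, decrementing the leaving char and incrementing the entering char per step; B recomputes each window's 26-slot count from scratch with a fresh list per start index and tallies it via d.get.
import Mathlib
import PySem

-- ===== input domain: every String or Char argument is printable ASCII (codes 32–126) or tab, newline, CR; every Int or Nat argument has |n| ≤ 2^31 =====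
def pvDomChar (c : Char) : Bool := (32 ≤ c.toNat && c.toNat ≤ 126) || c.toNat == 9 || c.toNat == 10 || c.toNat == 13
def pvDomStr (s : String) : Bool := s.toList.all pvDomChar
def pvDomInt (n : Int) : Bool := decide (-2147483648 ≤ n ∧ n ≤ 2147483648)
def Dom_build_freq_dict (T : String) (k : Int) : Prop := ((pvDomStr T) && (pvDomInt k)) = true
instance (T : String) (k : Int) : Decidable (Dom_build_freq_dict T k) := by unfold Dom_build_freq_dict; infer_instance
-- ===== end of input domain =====

-- B re-counts every window from scratch instead of sliding one window; same dict, no speed claim (alternative decomposition).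
-- shared transliteration of the Python line `freq[ord(c) - ord('a')] += δ` (read, add, write back; Python's negative-index wrap)
def pvBump (v : List Int) (c : Char) (δ : Int) : List Int :=
  PySem.List.pySetD v ((c.toNat : Int) - 97) (PySem.List.pyGetD v ((c.toNat : Int) - 97) 0 + δ)

-- ===== PORT A =====
def build_freq_dict (T : String) (k : Int) : List (List Int × Int) :=
  let cs := T.toList
  let d : PySem.Dict (List Int) Int := PySem.Dict.empty
  let freq : List Int := List.replicate 26 0
  let freq := (PySem.List.pyRange 0 k 1).foldl
    (fun freq i => pvBump freq (PySem.List.pyGetD cs i 'a') 1) freq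
  let d := d.insert freq 1
  let st := (PySem.List.pyRange k (cs.length : Int) 1).foldl
    (fun (st : List Int × PySem.Dict (List Int) Int) i =>
      let freq := pvBump st.1 (PySem.List.pyGetD cs (i - k) 'a') (-1)
      let freq := pvBump freq (PySem.List.pyGetD cs i 'a') 1
      (freq, st.2.insert freq (st.2.getD freq 0 + 1))) (freq, d)
  st.2.items

-- ===== PORT B =====
def build_freq_dict_alt (T : String) (k : Int) : List (List Int × Int) :=
  let cs := T.toList
  let first : List Int := List.replicate 26 0
  let first := (PySem.List.pyRange 0 k 1).foldl
    (fun first i => pvBump first (PySem.List.pyGetD cs i 'a') 1) first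
  let d : PySem.Dict (List Int) Int := PySem.Dict.ofList [(first, 1)]
  let d := (PySem.List.pyRange 1 ((cs.length : Int) - k + 1) 1).foldl
    (fun (d : PySem.Dict (List Int) Int) s =>
      let window := PySem.List.slice cs (some s) (some (s + k))
      let key := window.foldl (fun cnt c => pvBump cnt c 1) (List.replicate 26 0)
      d.insert key (d.getD key 0 + 1)) d
  d.items

-- ===== PRECONDITION & SPEC =====
-- Pre_ excludes exactly the inputs where A raises IndexError: k outside [0, len(T)],
-- or a character whose index ord(c)-97 falls outside Python's wrap range [-26, 25]
-- (i.e. a character with code outside [71, 122]).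
def Pre_build_freq_dict (T : String) (k : Int) : Prop :=
  0 ≤ k ∧ k ≤ (T.toList.length : Int) ∧ T.toList.all (fun c => 71 ≤ c.toNat && c.toNat ≤ 122) = true
instance (T : String) (k : Int) : Decidable (Pre_build_freq_dict T k) := by
  unfold Pre_build_freq_dict; infer_instance
def pvWitness_build_freq_dict : String × Int := ("ab", 1)

def Spec_build_freq_dict (T : String) (k : Int) (out : List (List Int × Int)) : Prop := out = build_freq_dict_alt T k
instance (T : String) (k : Int) (out : List (List Int × Int)) : Decidable (Spec_build_freq_dict T k out) := by unfold Spec_build_freq_dict; infer_instance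

-- ===== CLAIM (what is proved, stated in full; the proofs are below) =====
def Claim_equal_build_freq_dict : Prop := ∀ (T : String) (k : Int), Dom_build_freq_dict T k → Pre_build_freq_dict T k → Spec_build_freq_dict T k (build_freq_dict T k)

-- ===== LEMMAS AND PROOFS =====

-- the letter-count vector of a window: slot j counts chars whose Python index (code-97) wraps to j
def pvCnt (w : List Char) : List Int :=
  (List.range 26).map (fun (j : Nat) => ((w.countP (fun c => ((c.toNat : Int) - 97) % 26 == (j : Int))) : Int))

def pvGood (c : Char) : Prop := 71 ≤ c.toNat ∧ c.toNat ≤ 122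

-- Python index resolution on a 26-list: index p ∈ [-26,26) lands at nat slot (p % 26)
theorem pvIdx_mod (p : Int) (h1 : -26 ≤ p) (h2 : p < 26) :
    PySem.List.pyIdx? 26 p = some (p % 26).toNat := by
  unfold PySem.List.pyIdx?
  split_ifs with ha hb hc
  · simp only [Option.some.injEq]; omega
  · exfalso; omega
  · simp only [Option.some.injEq]; omega
  · exfalso; omega

theorem pvSetD_mod (v : List Int) (p x : Int) (h1 : -26 ≤ p) (h2 : p < 26) (hl : v.length = 26) :
    PySem.List.pySetD v p x = v.set (p % 26).toNat x := by
  unfold PySem.List.pySetD PySem.List.pySet?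
  rw [hl, pvIdx_mod p h1 h2]; rfl

theorem pvGetD_mod (v : List Int) (p d : Int) (h1 : -26 ≤ p) (h2 : p < 26) (hl : v.length = 26) :
    PySem.List.pyGetD v p d = v.getD (p % 26).toNat d := by
  unfold PySem.List.pyGetD PySem.List.pyGet?
  rw [hl, pvIdx_mod p h1 h2]
  simp [List.getD]

theorem pvCnt_length (w : List Char) : (pvCnt w).length = 26 := by simp [pvCnt]

theorem pvCnt_get (w : List Char) (j : Nat) (hj : j < 26) :
    (pvCnt w)[j]'(by simp [pvCnt_length, hj]) =
      ((w.countP (fun c => ((c.toNat : Int) - 97) % 26 == (j : Int))) : Int) := by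
  unfold pvCnt
  rw [List.getElem_map]
  simp only [List.getElem_range]

theorem pvCnt_nil : pvCnt [] = List.replicate 26 0 := by decide

theorem pvSlot_lt (c : Char) : (((c.toNat : Int) - 97) % 26).toNat < 26 := by omega

theorem pvBump_eq_set (v : List Int) (c : Char) (δ : Int) (hg : pvGood c) (hl : v.length = 26) :
    pvBump v c δ =
      v.set (((c.toNat : Int) - 97) % 26).toNat
        (v.getD (((c.toNat : Int) - 97) % 26).toNat 0 + δ) := by
  obtain ⟨h1, h2⟩ := hg
  unfold pvBump
  rw [pvSetD_mod _ _ _ (by omega) (by omega) hl,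
      pvGetD_mod _ _ _ (by omega) (by omega) hl]

-- appending a good char bumps its slot by one
theorem pvCnt_append (w : List Char) (c : Char) (hg : pvGood c) :
    pvBump (pvCnt w) c 1 = pvCnt (w ++ [c]) := by
  rw [pvBump_eq_set (pvCnt w) c 1 hg (pvCnt_length w)]
  have hlt := pvSlot_lt c
  have hgetD : (pvCnt w).getD (((c.toNat : Int) - 97) % 26).toNat 0
      = ((w.countP (fun c' => ((c'.toNat : Int) - 97) % 26 == (((((c.toNat : Int) - 97) % 26).toNat : Nat) : Int))) : Int) := by
    rw [List.getD_eq_getElem _ _ (by rw [pvCnt_length]; exact hlt)]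
    exact pvCnt_get w _ hlt
  apply List.ext_getElem
  · simp [pvCnt_length]
  · intro j hj hj'
    have hj26 : j < 26 := by simpa [pvCnt_length] using hj'
    rw [List.getElem_set, pvCnt_get (w ++ [c]) j hj26]
    by_cases hje : (((c.toNat : Int) - 97) % 26).toNat = j
    · rw [if_pos hje, hgetD]
      subst hje
      rw [List.countP_append]
      have hc : ((((c.toNat : Int) - 97) % 26 == (((((c.toNat : Int) - 97) % 26).toNat : Nat) : Int))) = true := by
        simp only [beq_iff_eq]; omega
      simp only [List.countP_cons, List.countP_nil, hc, if_pos, Nat.zero_add]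
      push_cast; ring
    · rw [if_neg hje, pvCnt_get w j hj26, List.countP_append]
      have hc : ((((c.toNat : Int) - 97) % 26 == ((j : Nat) : Int))) = false := by
        simp only [beq_eq_false_iff_ne, ne_eq]; omega
      simp [List.countP_nil, hc]

-- removing the head char (good) drops its slot by one
theorem pvCnt_cons_dec (w : List Char) (c : Char) (hg : pvGood c) :
    pvBump (pvCnt (c :: w)) c (-1) = pvCnt w := by
  rw [pvBump_eq_set (pvCnt (c :: w)) c (-1) hg (pvCnt_length _)]
  have hlt := pvSlot_lt c
  have hgetD : (pvCnt (c :: w)).getD (((c.toNat : Int) - 97) % 26).toNat 0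
      = (((c :: w).countP (fun c' => ((c'.toNat : Int) - 97) % 26 == (((((c.toNat : Int) - 97) % 26).toNat : Nat) : Int))) : Int) := by
    rw [List.getD_eq_getElem _ _ (by rw [pvCnt_length]; exact hlt)]
    exact pvCnt_get (c :: w) _ hlt
  apply List.ext_getElem
  · simp [pvCnt_length]
  · intro j hj hj'
    have hj26 : j < 26 := by simpa [pvCnt_length] using hj'
    rw [List.getElem_set, pvCnt_get w j hj26]
    by_cases hje : (((c.toNat : Int) - 97) % 26).toNat = j
    · rw [if_pos hje, hgetD]
      subst hje
      have hc : ((((c.toNat : Int) - 97) % 26 == (((((c.toNat : Int) - 97) % 26).toNat : Nat) : Int))) = true := by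
        simp only [beq_iff_eq]; omega
      simp only [List.countP_cons, hc]
      push_cast; ring
    · rw [if_neg hje, pvCnt_get (c :: w) j hj26]
      have hc : ((((c.toNat : Int) - 97) % 26 == ((j : Nat) : Int))) = false := by
        simp only [beq_eq_false_iff_ne, ne_eq]; omega
      simp [hc]

-- remove-then-add the same good char is the identity on a count vector
theorem pvBump_cancel (v : List Int) (c : Char) (hg : pvGood c) (hl : v.length = 26) :
    pvBump (pvBump v c (-1)) c 1 = v := by
  have hlt := pvSlot_lt c
  have hl' : (pvBump v c (-1)).length = 26 := by
    rw [pvBump_eq_set v c (-1) hg hl]; simpa using hl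
  rw [pvBump_eq_set (pvBump v c (-1)) c 1 hg hl', pvBump_eq_set v c (-1) hg hl]
  have hsl : (((c.toNat : Int) - 97) % 26).toNat < v.length := by rw [hl]; exact hlt
  have hget : (v.set (((c.toNat : Int) - 97) % 26).toNat (v.getD (((c.toNat : Int) - 97) % 26).toNat 0 + (-1))).getD (((c.toNat : Int) - 97) % 26).toNat 0
      = v.getD (((c.toNat : Int) - 97) % 26).toNat 0 + (-1) := by
    rw [List.getD_eq_getElem _ _ (by simpa using hsl)]
    exact List.getElem_set_self _
  rw [hget, List.set_set]
  have harith : v.getD (((c.toNat : Int) - 97) % 26).toNat 0 + (-1) + 1 = v.getD (((c.toNat : Int) - 97) % 26).toNat 0 := by ring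
  rw [harith, List.getD_eq_getElem _ _ hsl]
  exact List.set_getElem_self hsl

-- building a count vector char by char from zeros
theorem pvFold_cnt (w : List Char) (hg : ∀ c ∈ w, pvGood c) :
    w.foldl (fun cnt c => pvBump cnt c 1) (List.replicate 26 0) = pvCnt w := by
  induction w using List.reverseRecOn with
  | nil => exact pvCnt_nil.symm
  | append_singleton w c ih =>
      rw [List.foldl_append, ih (fun c' hc' => hg c' (by simp [hc']))]
      simp only [List.foldl_cons, List.foldl_nil]
      exact pvCnt_append w c (hg c (by simp))

-- one sliding step of A turns the window count at m into the one at m+1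
theorem pvStep (cs : List Char) (kn m : Nat) (h : kn + m < cs.length)
    (hg : ∀ c ∈ cs, pvGood c) :
    pvBump (pvBump (pvCnt ((cs.drop m).take kn)) (cs[m]'(by omega)) (-1)) (cs[kn + m]'(by omega)) 1
      = pvCnt ((cs.drop (m + 1)).take kn) := by
  have hgm : pvGood (cs[m]'(by omega)) := hg _ (List.getElem_mem _)
  have hgkm : pvGood (cs[kn + m]'(by omega)) := hg _ (List.getElem_mem _)
  cases kn with
  | zero =>
      simp only [List.take_zero, Nat.zero_add]
      exact pvBump_cancel _ _ hgm (pvCnt_length [])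
  | succ j =>
      have hdrop : (cs.drop m).take (j + 1) = (cs[m]'(by omega)) :: (cs.drop (m + 1)).take j := by
        rw [← List.getElem_cons_drop (by omega : m < cs.length), List.take_succ_cons]
      rw [hdrop, pvCnt_cons_dec _ _ hgm]
      rw [pvCnt_append _ _ hgkm]
      have htake : (cs.drop (m + 1)).take (j + 1)
          = (cs.drop (m + 1)).take j ++ [cs[j + 1 + m]'(by omega)] := by
        rw [List.take_add_one, List.getElem?_drop,
            show m + 1 + j = j + 1 + m from by omega,
            List.getElem?_eq_getElem (by omega : j + 1 + m < cs.length)]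
        rfl
      rw [htake]

-- indexing fold over range = fold over the prefix
theorem pvFoldl_range_getD {β : Type} (cs : List Char) (f : β → Char → β) :
    ∀ (m : Nat), m ≤ cs.length → ∀ (v : β),
      (List.range m).foldl (fun v j => f v (cs.getD j 'a')) v = (cs.take m).foldl f v := by
  intro m
  induction m with
  | zero => intro _ v; simp
  | succ m ih =>
      intro hm v
      rw [List.range_succ, List.foldl_append, ih (by omega),
          List.take_add_one, List.foldl_append]
      have h : cs[m]? = some (cs[m]'(by omega)) := List.getElem?_eq_getElem (by omega)
      simp [h, List.getD]

-- A's sliding loop, characterised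
theorem pvLoopA (cs : List Char) (kn : Nat) (hg : ∀ c ∈ cs, pvGood c) :
    ∀ (m : Nat), kn + m ≤ cs.length → ∀ (d : PySem.Dict (List Int) Int),
      ((List.range m).map (fun (j : Nat) => ((kn : Int) + (j : Int)))).foldl
        (fun (st : List Int × PySem.Dict (List Int) Int) i =>
          (pvBump (pvBump st.1 (PySem.List.pyGetD cs (i - (kn : Int)) 'a') (-1)) (PySem.List.pyGetD cs i 'a') 1,
           st.2.insert (pvBump (pvBump st.1 (PySem.List.pyGetD cs (i - (kn : Int)) 'a') (-1)) (PySem.List.pyGetD cs i 'a') 1)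
             (st.2.getD (pvBump (pvBump st.1 (PySem.List.pyGetD cs (i - (kn : Int)) 'a') (-1)) (PySem.List.pyGetD cs i 'a') 1) 0 + 1)))
        (pvCnt (cs.take kn), d)
      = (pvCnt ((cs.drop m).take kn),
         ((List.range m).map (fun (j : Nat) => pvCnt ((cs.drop (j + 1)).take kn))).foldl
           (fun d key => d.insert key (d.getD key 0 + 1)) d) := by
  intro m
  induction m with
  | zero => intro _ d; simp
  | succ m ih =>
      intro hm d
      rw [List.range_succ, List.map_append, List.foldl_append, ih (by omega) d,
          List.map_append, List.foldl_append]
      simp only [List.map_cons, List.map_nil, List.foldl_cons, List.foldl_nil]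
      have e1 : ((kn : Int) + (m : Int) - (kn : Int)) = ((m : Int)) := by ring
      have e2 : ((kn : Int) + (m : Int)) = (((kn + m : Nat) : Int)) := by push_cast; ring
      rw [e1, e2, PySem.List.pyGetD_natCast, PySem.List.pyGetD_natCast,
          List.getD_eq_getElem _ _ (by omega : m < cs.length),
          List.getD_eq_getElem _ _ (by omega : kn + m < cs.length),
          pvStep cs kn m (by omega) hg]

-- ===== VERDICT (by name: the statement is the Claim_ definition above) =====
theorem build_freq_dict_spec : Claim_equal_build_freq_dict := by
  intro T k hdom hpre
  obtain ⟨hk0, hk1, hgood⟩ := hpre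
  obtain ⟨kn, rfl⟩ : ∃ kn : Nat, k = (kn : Int) := ⟨k.toNat, (Int.toNat_of_nonneg hk0).symm⟩
  unfold Spec_build_freq_dict build_freq_dict build_freq_dict_alt
  dsimp only
  have hg : ∀ c ∈ T.toList, pvGood c := by
    intro c hc
    have h := (List.all_eq_true.mp hgood) c hc
    simp only [Bool.and_eq_true, decide_eq_true_eq] at h
    exact h
  have hkn : kn ≤ T.toList.length := by exact_mod_cast hk1
  -- A's first loop builds the count of the first window
  have hA1 : (PySem.List.pyRange 0 (kn : Int) 1).foldl
      (fun freq i => pvBump freq (PySem.List.pyGetD T.toList i 'a') 1) (List.replicate 26 0)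
      = pvCnt (T.toList.take kn) := by
    rw [PySem.List.pyRange_zero_nat kn, List.foldl_map,
        PySem.List.foldl_congr_mem _ _ (fun v (j : Nat) => pvBump v (T.toList.getD j 'a') 1) _
          (by intro acc x _; rw [PySem.List.pyGetD_natCast]),
        pvFoldl_range_getD T.toList (fun v c => pvBump v c 1) kn hkn]
    exact pvFold_cnt _ (fun c hc => hg c (List.mem_of_mem_take hc))
  rw [hA1]
  -- A's sliding loop
  have hr : PySem.List.pyRange (kn : Int) (T.toList.length : Int) 1
      = (List.range (T.toList.length - kn)).map (fun (j : Nat) => ((kn : Int) + (j : Int))) := by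
    rw [PySem.List.pyRange_one]
    have : ((T.toList.length : Int) - (kn : Int)).toNat = T.toList.length - kn := by omega
    rw [this]
  rw [hr, pvLoopA T.toList kn hg (T.toList.length - kn) (by omega) _]
  -- B's loop: each later window recounted from scratch
  have hrB : PySem.List.pyRange 1 ((T.toList.length : Int) - (kn : Int) + 1) 1
      = (List.range (T.toList.length - kn)).map (fun (j : Nat) => ((1 : Int) + (j : Int))) := by
    rw [PySem.List.pyRange_one]
    have : (((T.toList.length : Int) - (kn : Int) + 1) - 1).toNat = T.toList.length - kn := by omega
    rw [this]
  have hB : List.foldl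
      (fun (d : PySem.Dict (List Int) Int) (s : Int) =>
        d.insert (List.foldl (fun cnt c => pvBump cnt c 1) (List.replicate 26 0)
            (PySem.List.slice T.toList (some s) (some (s + (kn : Int)))))
          (d.getD (List.foldl (fun cnt c => pvBump cnt c 1) (List.replicate 26 0)
            (PySem.List.slice T.toList (some s) (some (s + (kn : Int))))) 0 + 1))
      (PySem.Dict.ofList [(pvCnt (T.toList.take kn), 1)])
      (PySem.List.pyRange 1 ((T.toList.length : Int) - (kn : Int) + 1) 1)
    = ((List.range (T.toList.length - kn)).map
        (fun (j : Nat) => pvCnt ((T.toList.drop (j + 1)).take kn))).foldl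
        (fun (d : PySem.Dict (List Int) Int) key => d.insert key (d.getD key 0 + 1))
        (PySem.Dict.ofList [(pvCnt (T.toList.take kn), 1)]) := by
    rw [hrB, List.foldl_map, List.foldl_map]
    apply PySem.List.foldl_congr_mem
    intro acc j _
    have h1 : ((1 : Int) + (j : Int)) = (((1 + j : Nat) : Int)) := by push_cast; ring
    rw [h1, PySem.List.slice_natCast_add T.toList (1 + j) kn,
        pvFold_cnt _ (fun c hc => hg c (List.mem_of_mem_drop (List.mem_of_mem_take hc))),
        Nat.add_comm 1 j]
  rw [hB]
  have hD0 : (PySem.Dict.ofList [(pvCnt (T.toList.take kn), 1)] : PySem.Dict (List Int) Int)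
      = PySem.Dict.empty.insert (pvCnt (T.toList.take kn)) 1 := rfl
  rw [hD0]
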